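-- pv_equiv track=rewrite | github.com/BattleshipAdmirals/Version1 | CombinedDraft.py | bitstring_to_grid
-- ===== SOURCE A (Python) =====
-- import math
--
-- def validate_size(size: int):
--     side_length = int(math.sqrt(size))
--     if side_length * side_length != size:
--         raise ValueError("Size must create perfect square")
--
-- def bitstring_to_grid(bitstring: str):
--     size = len(bitstring)
--     validate_size(size)
--     side_length = int(math.sqrt(size))
--
--     grid = [
--         ['.' if bitstring[i * side_length + j] == '1' else 'O' for j in range(side_length)]
--         for i in range(side_length)
--     ]
--     return grid
-- ===== SOURCE B (Python) =====
-- import math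
--
-- def validate_size(size: int):
--     side_length = int(math.sqrt(size))
--     if side_length * side_length != size:
--         raise ValueError("Size must create perfect square")
--
-- def bitstring_to_grid(bitstring: str):
--     size = len(bitstring)
--     validate_size(size)
--     side_length = int(math.sqrt(size))
--     flat = ['.' if c == '1' else 'O' for c in bitstring]
--     grid = []
--     while flat:
--         grid.append(flat[:side_length])
--         flat = flat[side_length:]
--     return grid
-- ===== Notes on version B (the rewrite author's own statement) =====
-- stated objective: alternative
-- what changed: Replaces the nested index-arithmetic comprehension (bitstring[i*side+j]) with a single flat character pass followed by a consume-the-list chunking loop that repeatedly splits off the first side_length cells.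
import Mathlib
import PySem

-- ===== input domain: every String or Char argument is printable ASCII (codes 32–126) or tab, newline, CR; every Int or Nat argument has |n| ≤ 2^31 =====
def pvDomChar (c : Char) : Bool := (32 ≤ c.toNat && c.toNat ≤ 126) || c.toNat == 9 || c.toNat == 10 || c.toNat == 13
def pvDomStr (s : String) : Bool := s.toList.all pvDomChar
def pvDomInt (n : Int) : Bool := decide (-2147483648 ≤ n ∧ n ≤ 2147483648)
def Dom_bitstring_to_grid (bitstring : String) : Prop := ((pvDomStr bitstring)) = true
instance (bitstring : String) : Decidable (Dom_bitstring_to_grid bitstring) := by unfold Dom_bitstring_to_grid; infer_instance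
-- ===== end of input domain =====

-- B rebuilds the grid by one flat char pass then a consume-the-list chunking loop instead of A's nested
-- index-arithmetic comprehension; same values everywhere A returns (objective: alternative, same cost).

-- ===== PORT A =====
-- int(math.sqrt(size)) on a size for which A returns (a perfect square, within Dom's sizes) is Nat.sqrt.
-- bitstring[i*side+j]: inside Pre_ the index is always in range, so pyGetD's default is never read.
def bitstring_to_grid (bitstring : String) : List (List String) :=
  let cs := bitstring.toList
  let size := cs.length
  let side := Nat.sqrt size
  (PySem.List.pyRange 0 side 1).map (fun i =>
    (PySem.List.pyRange 0 side 1).map (fun j =>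
      if PySem.List.pyGetD cs (i * side + j) ' ' = '1' then "." else "O"))

-- ===== PORT B =====
-- 'while flat: grid.append(flat[:side]); flat = flat[side:]' — structural recursion on flat.
-- 'rest.drop (side-1)' = '(x :: rest).drop side' for side ≥ 1 (the only case reachable with nonempty
-- flat inside Pre_); written this way so the recursion is visibly decreasing.
def pvChunks (side : Nat) : List String → List (List String)
  | [] => []
  | x :: rest => ((x :: rest).take side) :: pvChunks side (rest.drop (side - 1))
termination_by flat => flat.length
decreasing_by simp

def bitstring_to_grid_alt (bitstring : String) : List (List String) :=
  let cs := bitstring.toList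
  let size := cs.length
  let side := Nat.sqrt size
  let flat := cs.map (fun c => if c = '1' then "." else "O")
  pvChunks side flat

-- ===== PRECONDITION & SPEC =====
-- A raises ValueError unless the length is a perfect square.
def Pre_bitstring_to_grid (bitstring : String) : Prop :=
  ∃ k, k ≤ bitstring.toList.length ∧ k * k = bitstring.toList.length
instance (bitstring : String) : Decidable (Pre_bitstring_to_grid bitstring) := by unfold Pre_bitstring_to_grid; infer_instance

def pvWitness_bitstring_to_grid : String := "110010011"

def Spec_bitstring_to_grid (bitstring : String) (out : List (List String)) : Prop := out = bitstring_to_grid_alt bitstring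
instance (bitstring : String) (out : List (List String)) : Decidable (Spec_bitstring_to_grid bitstring out) := by unfold Spec_bitstring_to_grid; infer_instance

-- ===== CLAIM (what is proved, stated in full; the proofs are below) =====
def Claim_equal_bitstring_to_grid : Prop := ∀ (bitstring : String), Dom_bitstring_to_grid bitstring → Pre_bitstring_to_grid bitstring → Spec_bitstring_to_grid bitstring (bitstring_to_grid bitstring)

-- ===== LEMMAS AND PROOFS =====

-- chunking a list of length n*s (s ≥ 1) gives the n contiguous slices
lemma pvChunks_eq (s : Nat) (hs : 0 < s) :
    ∀ (n : Nat) (l : List String), l.length = n * s →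
      pvChunks s l = (List.range n).map (fun i => (l.drop (i * s)).take s) := by
  intro n
  induction n with
  | zero => intro l hl; simp at hl; simp [hl, pvChunks]
  | succ n ih =>
    intro l hl
    match l, hl with
    | [], hl => simp [Nat.succ_mul] at hl; omega
    | x :: rest, hl =>
      simp only [pvChunks]
      have hdrop : rest.drop (s - 1) = (x :: rest).drop s := by
        cases s with
        | zero => omega
        | succ k => simp
      have hl2 : rest.length + 1 = n * s + s := by simpa [Nat.succ_mul] using hl
      have hlen : (rest.drop (s - 1)).length = n * s := by rw [hdrop]; simp; omega
      rw [ih _ hlen, List.range_succ_eq_map]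
      simp only [List.map_cons, List.map_map]
      congr 1
      · simp
      · apply List.map_congr_left
        intro i _
        simp only [Function.comp]
        rw [hdrop, List.drop_drop]
        congr 2
        simp [Nat.succ_eq_add_one]
        ring

-- a row built by indexing equals the slice of the mapped list
lemma pv_row_eq {α β : Type} [Inhabited α] (l : List α) (g : α → β) (d : α) (off s : Nat)
    (h : off + s ≤ l.length) :
    (List.range s).map (fun j => g (l.getD (off + j) d)) = ((l.map g).drop off).take s := by
  apply List.ext_getElem
  · simp; omega
  · intro k h1 h2
    simp only [List.length_map, List.length_range] at h1
    rw [List.getElem_map, List.getElem_range, List.getElem_take, List.getElem_drop,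
        List.getElem_map, List.getD_eq_getElem _ _ (by omega)]

-- the core equality, for any side s with s * s = length
lemma pv_main (cs : List Char) (s : Nat) (hpre : s * s = cs.length) :
    (PySem.List.pyRange 0 s 1).map (fun i =>
        (PySem.List.pyRange 0 s 1).map (fun j =>
          if PySem.List.pyGetD cs (i * s + j) ' ' = '1' then "." else "O"))
      = pvChunks s (cs.map (fun c => if c = '1' then "." else "O")) := by
  by_cases hs : s = 0
  · subst hs
    simp at hpre
    have hnil : cs = [] := List.eq_nil_of_length_eq_zero hpre.symm
    simp [hnil, pvChunks]
  · have hs' : 0 < s := Nat.pos_of_ne_zero hs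
    rw [pvChunks_eq s hs' s (cs.map (fun c => if c = '1' then "." else "O")) (by simp; omega)]
    rw [PySem.List.pyRange_zero_nat, List.map_map]
    apply List.map_congr_left
    intro i' hi'
    simp only [List.mem_range] at hi'
    simp only [Function.comp]
    rw [List.map_map]
    have hrow := pv_row_eq cs (fun c => if c = '1' then "." else "O") ' ' (i' * s) s
      (by rw [← hpre]
          calc i' * s + s = (i' + 1) * s := by ring
            _ ≤ s * s := Nat.mul_le_mul_right s (by omega))
    rw [← hrow]
    apply List.map_congr_left
    intro j hj
    simp only [List.mem_range] at hj
    simp only [Function.comp]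
    have hcast : (i' : Int) * (s : Nat) + (j : Nat) = ((i' * s + j : Nat) : Int) := by
      push_cast; ring
    rw [hcast, PySem.List.pyGetD_natCast]

-- ===== VERDICT (by name: the statement is the Claim_ definition above) =====
theorem bitstring_to_grid_spec : Claim_equal_bitstring_to_grid := by
  intro bs _ hpre
  unfold Pre_bitstring_to_grid at hpre
  obtain ⟨k, _, hkk⟩ := hpre
  have hroot : Nat.sqrt bs.toList.length = k := by
    rw [← hkk]; rw [← pow_two]; exact Nat.sqrt_eq' k
  unfold Spec_bitstring_to_grid bitstring_to_grid bitstring_to_grid_alt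
  exact pv_main bs.toList (Nat.sqrt bs.toList.length) (by rw [hroot]; exact hkk)
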